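-- pv_equiv track=rewrite | github.com/probablyanasian/advent-of-code | 2023/12/a.py | get_int_char
-- ===== SOURCE A (Python) =====
-- def get_int_char(springs: list[str], interested: str) -> list[list[int], list[int]]:
--     ret = [[], []]
--     cnt = 0
--     for idx, char in enumerate(springs):
--         if char == interested:
--             cnt += 1
--             ret[1].append(idx)
--         elif cnt > 0:
--             ret[0].append(cnt)
--             cnt = 0
--     if cnt > 0:
--         ret[0].append(cnt)
--     return ret
-- ===== SOURCE B (Python) =====
-- def get_int_char(springs: list[str], interested: str) -> list[list[int]]:
--     idxs = [i for i, c in enumerate(springs) if c == interested]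
--     runs = []
--     if idxs:
--         prev = idxs[0]
--         length = 1
--         for j in idxs[1:]:
--             if j == prev + 1:
--                 length += 1
--             else:
--                 runs.append(length)
--                 length = 1
--             prev = j
--         runs.append(length)
--     return [runs, idxs]
-- ===== Notes on version B (the rewrite author's own statement) =====
-- stated objective: alternative
-- what changed: A's single stateful scan (running counter flushed on mismatch and at the end) is replaced by a two-phase decomposition: first collect all matching indices with a comprehension, then derive the run lengths by scanning that index list for maximal blocks of consecutive indices.
import Mathlib
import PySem

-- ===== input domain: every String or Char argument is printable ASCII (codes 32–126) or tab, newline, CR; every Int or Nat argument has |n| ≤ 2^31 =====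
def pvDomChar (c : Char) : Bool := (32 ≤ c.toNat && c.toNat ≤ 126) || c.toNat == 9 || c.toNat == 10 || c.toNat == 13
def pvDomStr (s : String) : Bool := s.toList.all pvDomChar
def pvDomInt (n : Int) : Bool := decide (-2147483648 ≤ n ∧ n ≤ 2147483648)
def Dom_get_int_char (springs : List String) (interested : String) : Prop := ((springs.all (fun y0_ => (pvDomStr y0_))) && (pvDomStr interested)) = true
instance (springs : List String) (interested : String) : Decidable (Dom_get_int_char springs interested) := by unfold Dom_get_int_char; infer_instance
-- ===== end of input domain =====

-- B replaces A's single stateful counting scan by a two-phase decomposition: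
-- first collect matching indices, then derive run lengths from consecutive-index blocks (objective: alternative).


-- ===== PORT A =====
-- literal transliteration of A: one fold over enumerate(springs) with state (ret0, ret1, cnt)
def get_int_char (springs : List String) (interested : String) : List (List Int) :=
  let st := (PySem.List.enumerate springs 0).foldl
    (fun (s : List Int × List Int × Int) (p : Int × String) =>
      if p.2 == interested then (s.1, s.2.1 ++ [p.1], s.2.2 + 1)
      else if s.2.2 > 0 then (s.1 ++ [s.2.2], s.2.1, 0)
      else s) ([], [], 0)
  [if st.2.2 > 0 then st.1 ++ [st.2.2] else st.1, st.2.1]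

-- ===== PORT B =====
-- B helper: the for-loop of Source B (plus its final append): given the tail of the index list,
-- the previous index and the current block length, emit the lengths of the maximal consecutive blocks.
def gicRuns : List Int → Int → Int → List Int
  | [], _, len => [len]
  | j :: rest, prev, len =>
      if j == prev + 1 then gicRuns rest j (len + 1)
      else len :: gicRuns rest j 1

def get_int_char_alt (springs : List String) (interested : String) : List (List Int) :=
  let idxs := ((PySem.List.enumerate springs 0).filter (fun p => p.2 == interested)).map (fun p => p.1)
  let runs := match idxs with
    | [] => []
    | x :: rest => gicRuns rest x 1
  [runs, idxs]

-- ===== PRECONDITION & SPEC =====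
def Spec_get_int_char (springs : List String) (interested : String) (out : List (List Int)) : Prop := out = get_int_char_alt springs interested
instance (springs : List String) (interested : String) (out : List (List Int)) : Decidable (Spec_get_int_char springs interested out) := by unfold Spec_get_int_char; infer_instance

-- ===== CLAIM (what is proved, stated in full; the proofs are below) =====
def Claim_equal_get_int_char : Prop := ∀ (springs : List String) (interested : String), Dom_get_int_char springs interested → Spec_get_int_char springs interested (get_int_char springs interested)

-- ===== LEMMAS AND PROOFS =====

-- proof-side helpers: A's final flush, the run list continuing an open run of length cnt ending
-- at index n-1, and the matching indices of l enumerated from n.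
def finishA (st : List Int × List Int × Int) : List Int × List Int :=
  ((if st.2.2 > 0 then st.1 ++ [st.2.2] else st.1), st.2.1)

def runsB (cnt : Int) (n : Int) (idxs : List Int) : List Int :=
  if cnt > 0 then gicRuns idxs (n - 1) cnt
  else match idxs with
    | [] => []
    | x :: rest => gicRuns rest x 1

def idxsFrom (interested : String) (n : Int) (l : List String) : List Int :=
  ((PySem.List.enumerate l n).filter (fun p => p.2 == interested)).map (fun p => p.1)

theorem idxsFrom_ge (interested : String) (n : Int) (l : List String) :
    ∀ x ∈ idxsFrom interested n l, n ≤ x := by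
  induction l generalizing n with
  | nil => simp [idxsFrom, PySem.List.enumerate_nil]
  | cons s rest ih =>
    intro x hx
    simp only [idxsFrom, PySem.List.enumerate_cons, List.filter_cons] at hx
    by_cases h : (s == interested) = true
    · simp only [h, if_pos, List.map_cons, List.mem_cons] at hx
      rcases hx with rfl | hx
      · omega
      · have := ih (n + 1) x hx; omega
    · simp only [h] at hx
      have := ih (n + 1) x hx; omega

theorem idxsFrom_cons (interested : String) (n : Int) (s : String) (l : List String) :
    idxsFrom interested n (s :: l) =
      if (s == interested) = true then n :: idxsFrom interested (n+1) l
      else idxsFrom interested (n+1) l := by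
  simp only [idxsFrom, PySem.List.enumerate_cons, List.filter_cons]
  split_ifs with h
  · simp
  · simp

-- continuing an open run over a matching index extends the block
theorem runsB_match (cnt n : Int) (idxs : List Int) (hc : 0 < cnt ∨ cnt = 0) :
    runsB cnt n (n :: idxs) = runsB (cnt + 1) (n + 1) idxs := by
  rcases hc with hcp | rfl
  · simp only [runsB, if_pos hcp, if_pos (show cnt + 1 > 0 by omega), gicRuns]
    rw [if_pos (show (n == n - 1 + 1) = true by simp)]
    congr 1; omega
  · simp only [runsB, gt_iff_lt, lt_self_iff_false, if_false, if_pos (show (0:Int) + 1 > 0 by omega)]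
    congr 1
    omega

-- a non-matching position flushes an open run
theorem runsB_flush (cnt n : Int) (idxs : List Int) (hcp : 0 < cnt)
    (hge : ∀ x ∈ idxs, n + 1 ≤ x) :
    runsB cnt n idxs = cnt :: runsB 0 (n + 1) idxs := by
  cases idxs with
  | nil => simp [runsB, hcp, gicRuns]
  | cons x xs =>
    have hx : n + 1 ≤ x := hge x (by simp)
    simp only [runsB, if_pos hcp, gicRuns, gt_iff_lt, lt_self_iff_false, if_false]
    rw [if_neg (show ¬ ((x == n - 1 + 1) = true) by simp; omega)]

-- with no open run, the starting index is irrelevant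
theorem runsB_zero (n m : Int) (idxs : List Int) : runsB 0 n idxs = runsB 0 m idxs := by
  cases idxs <;> simp [runsB]

-- main invariant: A's fold started at index n with state (r0, r1, cnt), after the final flush,
-- produces exactly r0 ++ runsB cnt n idxs for the run list and r1 ++ idxs for the index list.
theorem main_inv (interested : String) (l : List String) :
    ∀ (n : Int) (r0 r1 : List Int) (cnt : Int), 0 < cnt ∨ cnt = 0 →
    finishA ((PySem.List.enumerate l n).foldl
      (fun (s : List Int × List Int × Int) (p : Int × String) =>
        if p.2 == interested then (s.1, s.2.1 ++ [p.1], s.2.2 + 1)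
        else if s.2.2 > 0 then (s.1 ++ [s.2.2], s.2.1, 0)
        else s) (r0, r1, cnt))
    = (r0 ++ runsB cnt n (idxsFrom interested n l), r1 ++ idxsFrom interested n l) := by
  induction l with
  | nil =>
    intro n r0 r1 cnt hc
    simp only [PySem.List.enumerate_nil, List.foldl_nil, idxsFrom, List.filter_nil, List.map_nil,
      List.append_nil, finishA]
    rcases hc with hc | rfl
    · simp [runsB, hc, gicRuns]
    · simp [runsB]
  | cons s rest ih =>
    intro n r0 r1 cnt hc
    simp only [PySem.List.enumerate_cons, List.foldl_cons, idxsFrom_cons]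
    by_cases hs : (s == interested) = true
    · rw [if_pos hs, if_pos hs, ih (n + 1) r0 (r1 ++ [n]) (cnt + 1) (by omega),
        runsB_match cnt n _ hc]
      simp
    · rw [if_neg hs, if_neg hs]
      rcases hc with hcp | rfl
      · rw [if_pos hcp, ih (n + 1) (r0 ++ [cnt]) r1 0 (Or.inr rfl),
          runsB_flush cnt n _ hcp (idxsFrom_ge interested (n + 1) rest)]
        simp
      · rw [if_neg (show ¬ ((0:Int) > 0) by omega), ih (n + 1) r0 r1 0 (Or.inr rfl),
          runsB_zero (n + 1) n]

-- ===== VERDICT (by name: the statement is the Claim_ definition above) =====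
theorem get_int_char_spec : Claim_equal_get_int_char := by
  intro springs interested _
  unfold Spec_get_int_char get_int_char get_int_char_alt
  have h := main_inv interested springs 0 [] [] 0 (Or.inr rfl)
  simp only [List.nil_append] at h
  show [(finishA _).1, (finishA _).2] =
    [match idxsFrom interested 0 springs with
      | [] => []
      | x :: rest => gicRuns rest x 1, idxsFrom interested 0 springs]
  rw [h]
  have : runsB 0 0 (idxsFrom interested 0 springs)
      = match idxsFrom interested 0 springs with
        | [] => []
        | x :: rest => gicRuns rest x 1 := by
    cases idxsFrom interested 0 springs <;> simp [runsB]
  simp only [this]
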